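-- pv_equiv track=rewrite | github.com/olapiv/neural-repair-static-analysis | tokenizing_unified_dataset.py | split_tokens_by_line
-- ===== SOURCE A (Python) =====
-- def split_tokens_by_line(orig_file_tokens):
--     orig_file_line_tokens = [[]]
--     idx = 0
--     for (token_type, value) in orig_file_tokens:
--         orig_file_line_tokens[idx].append((token_type, value))
--         if value == "NEWLINE":
--             orig_file_line_tokens.append([])
--             idx += 1
--
--     return orig_file_line_tokens
-- ===== SOURCE B (Python) =====
-- def split_tokens_by_line(orig_file_tokens):
--     values = [v for (_, v) in orig_file_tokens]
--     if "NEWLINE" not in values: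
--         return [[(t, v) for (t, v) in orig_file_tokens]]
--     i = values.index("NEWLINE")
--     head = [(t, v) for (t, v) in orig_file_tokens[:i + 1]]
--     return [head] + split_tokens_by_line(orig_file_tokens[i + 1:])
-- ===== Notes on version B (the rewrite author's own statement) =====
-- stated objective: alternative
-- what changed: B is recursive search-and-slice: it finds the index of the first NEWLINE value, slices off that line (tokens[:i+1]) and recurses on the remainder (tokens[i+1:]), instead of A's single element-by-element pass that mutates the growing result list at a tracked index.
import Mathlib
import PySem

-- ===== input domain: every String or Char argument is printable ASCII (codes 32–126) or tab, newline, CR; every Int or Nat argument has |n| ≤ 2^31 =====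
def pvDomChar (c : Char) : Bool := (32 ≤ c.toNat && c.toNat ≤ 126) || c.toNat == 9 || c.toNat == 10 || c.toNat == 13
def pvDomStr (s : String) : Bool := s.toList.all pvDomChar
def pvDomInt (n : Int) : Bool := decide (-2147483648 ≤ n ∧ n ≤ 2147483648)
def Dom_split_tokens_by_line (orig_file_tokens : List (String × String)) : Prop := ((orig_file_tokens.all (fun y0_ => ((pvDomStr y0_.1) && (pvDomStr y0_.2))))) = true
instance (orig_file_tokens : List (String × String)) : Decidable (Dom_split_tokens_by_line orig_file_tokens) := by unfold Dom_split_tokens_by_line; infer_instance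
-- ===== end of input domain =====

-- B replaces A's single element-by-element pass (mutating the growing result at a tracked
-- index) by a recursive search-and-slice decomposition: find the first NEWLINE, slice off
-- that line, recurse on the rest (objective: alternative).

-- ===== PORT A =====
-- Literal port of A: state is (orig_file_line_tokens, idx); each token is appended to the list at idx.
def split_tokens_by_line (orig_file_tokens : List (String × String)) : List (List (String × String)) :=
  (orig_file_tokens.foldl
    (fun (st : List (List (String × String)) × Nat) tv =>
      let lines := st.1.modify st.2 (fun l => l ++ [(tv.1, tv.2)])
      if tv.2 == "NEWLINE" then (lines ++ [[]], st.2 + 1) else (lines, st.2))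
    ([[]], 0)).1

-- ===== PORT B =====
-- Literal port of B: values = map snd; the 'in' test and '.index' are the two outcomes of
-- PySem.List.index?; slices tokens[:i+1] / tokens[i+1:] are PySem.List.slice; recurse on the tail.
def split_tokens_by_line_alt (orig_file_tokens : List (String × String)) : List (List (String × String)) :=
  let values := orig_file_tokens.map (fun tv => tv.2)
  match h : PySem.List.index? values "NEWLINE" with
  | none => [orig_file_tokens.map (fun tv => (tv.1, tv.2))]
  | some i =>
      (PySem.List.slice orig_file_tokens none (some ((i : Int) + 1))).map (fun tv => (tv.1, tv.2)) ::
        split_tokens_by_line_alt (PySem.List.slice orig_file_tokens (some ((i : Int) + 1)) none)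
termination_by orig_file_tokens.length
decreasing_by
  obtain ⟨hk, -, -⟩ := PySem.List.getElem_of_index?_eq_some h
  have hk' : i < orig_file_tokens.length := by simpa [values] using hk
  have : ((i : Int) + 1) = ((i + 1 : Nat) : Int) := by push_cast; ring
  rw [this, PySem.List.slice_from_natCast, List.length_drop]
  omega

-- ===== PRECONDITION & SPEC =====
def Spec_split_tokens_by_line (orig_file_tokens : List (String × String)) (out : List (List (String × String))) : Prop := out = split_tokens_by_line_alt orig_file_tokens
instance (orig_file_tokens : List (String × String)) (out : List (List (String × String))) : Decidable (Spec_split_tokens_by_line orig_file_tokens out) := by unfold Spec_split_tokens_by_line; infer_instance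

-- ===== CLAIM (what is proved, stated in full; the proofs are below) =====
def Claim_equal_split_tokens_by_line : Prop := ∀ (orig_file_tokens : List (String × String)), Dom_split_tokens_by_line orig_file_tokens → Spec_split_tokens_by_line orig_file_tokens (split_tokens_by_line orig_file_tokens)

-- ===== LEMMAS AND PROOFS =====

-- Common reference function: split with an explicit current-line accumulator.
def pvSplit : List (String × String) → List (String × String) → List (List (String × String))
  | [], cur => [cur]
  | tv :: rest, cur =>
      if tv.2 == "NEWLINE" then (cur ++ [tv]) :: pvSplit rest [] else pvSplit rest (cur ++ [tv])

theorem modify_append_singleton {α : Type} (done : List α) (cur : α) (f : α → α) :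
    (done ++ [cur]).modify done.length f = done ++ [f cur] := by
  induction done with
  | nil => simp [List.modify]
  | cons a t ih => simp [List.modify] at ih ⊢; exact ih

theorem A_invariant (ts : List (String × String)) (done : List (List (String × String)))
    (cur : List (String × String)) :
    (ts.foldl
      (fun (st : List (List (String × String)) × Nat) tv =>
        let lines := st.1.modify st.2 (fun l => l ++ [(tv.1, tv.2)])
        if tv.2 == "NEWLINE" then (lines ++ [[]], st.2 + 1) else (lines, st.2))
      (done ++ [cur], done.length)).1 = done ++ pvSplit ts cur := by
  induction ts generalizing done cur with
  | nil => simp [pvSplit]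
  | cons tv rest ih =>
    simp only [List.foldl_cons, pvSplit]
    by_cases h : tv.2 == "NEWLINE"
    · simp only [h, if_pos, modify_append_singleton]
      have := ih (done ++ [cur ++ [(tv.1, tv.2)]]) []
      simpa using this
    · simp only [h, if_neg, modify_append_singleton, Bool.false_eq_true, not_false_iff]
      simpa [modify_append_singleton] using ih done (cur ++ [(tv.1, tv.2)])

theorem pvSplit_no_nl (ts cur : List (String × String))
    (h : ∀ tv ∈ ts, tv.2 ≠ "NEWLINE") : pvSplit ts cur = [cur ++ ts] := by
  induction ts generalizing cur with
  | nil => simp [pvSplit]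
  | cons tv rest ih =>
    have h1 : tv.2 ≠ "NEWLINE" := h tv (by simp)
    simp only [pvSplit, beq_iff_eq, h1, if_neg, not_false_iff]
    rw [ih _ (fun x hx => h x (by simp [hx]))]
    simp

theorem pvSplit_with_nl (pre : List (String × String)) (mid : String × String)
    (suf cur : List (String × String))
    (hpre : ∀ tv ∈ pre, tv.2 ≠ "NEWLINE") (hmid : mid.2 = "NEWLINE") :
    pvSplit (pre ++ mid :: suf) cur = (cur ++ pre ++ [mid]) :: pvSplit suf [] := by
  induction pre generalizing cur with
  | nil => simp [pvSplit, hmid]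
  | cons tv rest ih =>
    have h1 : tv.2 ≠ "NEWLINE" := hpre tv (by simp)
    simp only [List.cons_append, pvSplit, beq_iff_eq, h1, if_neg, not_false_iff]
    rw [ih _ (fun x hx => hpre x (by simp [hx]))]
    simp

theorem alt_eq_pvSplit (ts : List (String × String)) :
    split_tokens_by_line_alt ts = pvSplit ts [] := by
  induction hn : ts.length using Nat.strong_induction_on generalizing ts with
  | _ n ih =>
  rw [split_tokens_by_line_alt.eq_def]
  dsimp only
  split
  · -- no NEWLINE
    rename_i h
    have hno : "NEWLINE" ∉ ts.map (fun tv => tv.2) := (PySem.List.index?_eq_none_iff _ _).mp h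
    rw [pvSplit_no_nl ts [] (fun tv htv hc => hno (hc ▸ List.mem_map_of_mem htv))]
    simp
  · rename_i i h
    obtain ⟨hk, hval, -⟩ := PySem.List.getElem_of_index?_eq_some h
    obtain ⟨p, s, hdecomp, hplen, hpnot⟩ := (PySem.List.index?_eq_some_iff _ _ _).mp h
    simp only [List.length_map] at hk
    have hcast : ((i : Int) + 1) = ((i + 1 : Nat) : Int) := by push_cast; ring
    rw [hcast, PySem.List.slice_to_natCast, PySem.List.slice_from_natCast]
    have hts : ts = ts.take i ++ ts[i] :: ts.drop (i + 1) := by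
      conv_lhs => rw [← List.take_append_drop i ts]
      rw [List.drop_eq_getElem_cons hk]
    have hmid : (ts[i]).2 = "NEWLINE" := by
      have h2 : (ts.map (fun tv => tv.2))[i]'(by simpa using hk) = "NEWLINE" := hval
      simpa using h2
    have hpreno : ∀ tv ∈ ts.take i, tv.2 ≠ "NEWLINE" := by
      intro tv htv hc
      have hpmap : (ts.take i).map (fun tv => tv.2) = p := by
        rw [List.map_take, hdecomp, ← hplen, List.take_append_of_le_length (le_refl _)]
        simp
      exact hpnot (hpmap ▸ hc ▸ List.mem_map_of_mem htv)
    have htake : ts.take (i + 1) = ts.take i ++ [ts[i]] := List.take_succ_eq_append_getElem hk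
    have hrec : split_tokens_by_line_alt (ts.drop (i + 1)) = pvSplit (ts.drop (i + 1)) [] :=
      ih (ts.drop (i + 1)).length (by rw [List.length_drop]; omega) _ rfl
    rw [hrec, htake]
    conv_rhs => rw [hts]
    rw [pvSplit_with_nl _ _ _ _ hpreno hmid]
    simp

-- ===== VERDICT (by name: the statement is the Claim_ definition above) =====
theorem split_tokens_by_line_spec : Claim_equal_split_tokens_by_line := by
  intro ts _
  unfold Spec_split_tokens_by_line split_tokens_by_line
  rw [alt_eq_pvSplit]
  simpa using A_invariant ts [] []
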